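-- pv_equiv track=rewrite | github.com/nobodyknowwhy/distance_analysis | leetcode/7414004855077584940.py | solution
-- ===== SOURCE A (Python) =====
-- def solution(n, max, array):
--     # Edit your code here
--     from collections import Counter
--     counter_result = Counter(array)
--
--     tuple_all_b = sorted([key for key, value in counter_result.items() if value >= 2 and 2 * key < max], reverse=True)
--
--     tuple_all_a = sorted([key for key, value in counter_result.items() if value >= 3 and 3 * key < max], reverse=True)
--
--     if 1 in tuple_all_a:
--         tuple_all_a.pop(-1)
--         tuple_all_a.insert(0, 1)
--
--     if 1 in tuple_all_b:
--         tuple_all_b.pop(-1)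
--         tuple_all_b.insert(0, 1)
--
--     for x in tuple_all_a:
--         for y in tuple_all_b:
--             if 3 * x + 2 * y <= max and x != y:
--                 return [x, y]
--
--     return [0, 0]
-- ===== SOURCE B (Python) =====
-- def solution(n, max, array):
--     counts = {}
--     for v in array:
--         counts[v] = counts.get(v, 0) + 1
--     xs = sorted(k for k, c in counts.items() if c >= 3 and 3 * k < max)
--     ys = sorted(k for k, c in counts.items() if c >= 2 and 2 * k < max)
--     xs.reverse()
--     ys.reverse()
--     if 1 in xs:
--         xs = [1] + xs[:-1]
--     front = None
--     if 1 in ys: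
--         front = 1
--         ys = ys[:-1]
--     # ys is strictly descending: binary search per x instead of an inner scan
--     for x in xs:
--         if front is not None and 3 * x + 2 * front <= max and x != front:
--             return [x, front]
--         t = max - 3 * x
--         lo, hi = 0, len(ys)
--         while lo < hi:
--             mid = (lo + hi) // 2
--             if 2 * ys[mid] <= t:
--                 hi = mid
--             else:
--                 lo = mid + 1
--         if lo < len(ys):
--             if ys[lo] != x:
--                 return [x, ys[lo]]
--             if lo + 1 < len(ys):
--                 return [x, ys[lo + 1]]
--     return [0, 0]
-- ===== Notes on version B (the rewrite author's own statement) =====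
-- stated objective: alternative
-- what changed: B builds the counts with one dict pass and replaces A's nested scan over all (x,y) candidate pairs with, for each x, a binary search for the first admissible y in the strictly descending candidate list (the 1 moved to the front is checked separately).
import Mathlib
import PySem

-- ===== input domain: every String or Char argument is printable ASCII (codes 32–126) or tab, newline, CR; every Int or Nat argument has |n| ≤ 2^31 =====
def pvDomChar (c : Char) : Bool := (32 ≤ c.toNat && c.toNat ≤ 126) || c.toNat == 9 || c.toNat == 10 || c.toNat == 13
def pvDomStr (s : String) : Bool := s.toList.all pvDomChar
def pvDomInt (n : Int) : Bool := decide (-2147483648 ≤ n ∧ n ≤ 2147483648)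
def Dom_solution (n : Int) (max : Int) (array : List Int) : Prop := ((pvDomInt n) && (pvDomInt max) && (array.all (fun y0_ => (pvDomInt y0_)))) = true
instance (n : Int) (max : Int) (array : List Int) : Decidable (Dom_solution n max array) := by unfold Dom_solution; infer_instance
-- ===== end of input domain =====

-- B replaces A's nested scan over candidate pairs with a per-x binary search over the strictly
-- descending candidate list (the moved-to-front 1 checked separately): an alternative algorithm, same measured cost.

-- ===== PORT A =====
-- inner 'for y in tuple_all_b: if 3*x+2*y <= max and x != y: return [x, y]'
def innerA (mx x : Int) : List Int → Option Int
  | [] => none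
  | y :: ys => if 3 * x + 2 * y ≤ mx ∧ x ≠ y then some y else innerA mx x ys

-- outer 'for x in tuple_all_a: …' with final 'return [0, 0]'
def outerA (mx : Int) (tb : List Int) : List Int → List Int
  | [] => [0, 0]
  | x :: xs =>
    match innerA mx x tb with
    | some y => [x, y]
    | none => outerA mx tb xs

-- 'if 1 in l: l.pop(-1); l.insert(0, 1)'
def reorderA (l : List Int) : List Int :=
  if 1 ∈ l then 1 :: l.dropLast else l

def solution (n : Int) (max : Int) (array : List Int) : List Int :=
  let cr := PySem.Dict.counter array
  let tb := PySem.List.sorted ((cr.items.filter (fun p => decide (2 ≤ p.2) && decide (2 * p.1 < max))).map Prod.fst) (fun k => k) true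
  let ta := PySem.List.sorted ((cr.items.filter (fun p => decide (3 ≤ p.2) && decide (3 * p.1 < max))).map Prod.fst) (fun k => k) true
  outerA max (reorderA tb) (reorderA ta)

-- ===== PORT B =====
-- counts[v] = counts.get(v, 0) + 1
def countsB (array : List Int) : PySem.Dict Int Int :=
  array.foldl (fun d v => d.insert v (d.getD v 0 + 1)) PySem.Dict.empty

-- sorted(k for k, c in counts.items() if c >= cmin and mul*k < max) followed by .reverse()
def candB (d : PySem.Dict Int Int) (cmin mul mx : Int) : List Int :=
  (PySem.List.sorted ((d.items.filter (fun p => decide (cmin ≤ p.2) && decide (mul * p.1 < mx))).map Prod.fst) (fun k => k) false).reverse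

-- the while-loop binary search: least index i in [lo,hi) with 2*ys[i] <= t (ys strictly descending), else hi
def bsearchB (ys : List Int) (t : Int) (lo hi : Nat) : Nat :=
  if _h : lo < hi then
    let mid := (lo + hi) / 2
    if 2 * ys.getD mid 0 ≤ t then bsearchB ys t lo mid
    else bsearchB ys t (mid + 1) hi
  else lo
termination_by hi - lo
decreasing_by all_goals omega

-- 'if lo < len(ys): …' after the search
def searchAtB (ys : List Int) (i : Nat) (x : Int) : Option Int :=
  if i < ys.length then
    if ys.getD i 0 ≠ x then some (ys.getD i 0)
    else if i + 1 < ys.length then some (ys.getD (i + 1) 0)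
    else none
  else none

-- body of one outer iteration: the front-1 check, then binary search
def stepB (mx x : Int) (front : Option Int) (ys : List Int) : Option Int :=
  match front with
  | some f =>
    if 3 * x + 2 * f ≤ mx ∧ x ≠ f then some f
    else searchAtB ys (bsearchB ys (mx - 3 * x) 0 ys.length) x
  | none => searchAtB ys (bsearchB ys (mx - 3 * x) 0 ys.length) x

def outerB (mx : Int) (front : Option Int) (ys : List Int) : List Int → List Int
  | [] => [0, 0]
  | x :: xs =>
    match stepB mx x front ys with
    | some y => [x, y]
    | none => outerB mx front ys xs

def solution_alt (n : Int) (max : Int) (array : List Int) : List Int :=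
  let counts := countsB array
  let xs0 := candB counts 3 3 max
  let ys0 := candB counts 2 2 max
  let xs := if 1 ∈ xs0 then 1 :: xs0.dropLast else xs0
  let fy : Option Int × List Int := if 1 ∈ ys0 then (some 1, ys0.dropLast) else (none, ys0)
  outerB max fy.1 fy.2 xs

-- ===== PRECONDITION & SPEC =====
def Spec_solution (n : Int) (max : Int) (array : List Int) (out : List Int) : Prop := out = solution_alt n max array
instance (n : Int) (max : Int) (array : List Int) (out : List Int) : Decidable (Spec_solution n max array out) := by unfold Spec_solution; infer_instance

-- ===== CLAIM (what is proved, stated in full; the proofs are below) =====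
def Claim_equal_solution : Prop := ∀ (n : Int) (max : Int) (array : List Int), Dom_solution n max array → Spec_solution n max array (solution n max array)

-- ===== LEMMAS AND PROOFS =====

-- length of the prefix of ys on which 2*y <= t fails
def kOf (ys : List Int) (t : Int) : Nat :=
  (ys.takeWhile (fun y => !decide (2 * y ≤ t))).length

theorem kOf_le_length (ys : List Int) (t : Int) : kOf ys t ≤ ys.length := by
  simpa [kOf] using List.Sublist.length_le (List.takeWhile_sublist (fun y => !decide (2 * y ≤ t)) (l := ys))

theorem desc_char (ys : List Int) (t : Int) (h : ys.Pairwise (· > ·)) :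
    ∀ i, i < ys.length → ((2 * ys.getD i 0 ≤ t) ↔ kOf ys t ≤ i) := by
  induction ys with
  | nil => intro i hi; simp at hi
  | cons y tl ih =>
    intro i hi
    rcases List.pairwise_cons.mp h with ⟨hy, htl⟩
    by_cases hcy : 2 * y ≤ t
    · have hk : kOf (y :: tl) t = 0 := by simp [kOf, List.takeWhile, hcy]
      rw [hk]
      cases i with
      | zero => simpa using hcy
      | succ j =>
        simp only [List.getD_cons_succ]
        have hj : j < tl.length := by simpa using hi
        have hmem : tl.getD j 0 ∈ tl := by
          rw [List.getD_eq_getElem _ _ hj]; exact List.getElem_mem hj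
        have : tl.getD j 0 < y := hy _ hmem
        constructor <;> intro _ <;> omega
    · have hk : kOf (y :: tl) t = kOf tl t + 1 := by simp [kOf, List.takeWhile, hcy]
      rw [hk]
      cases i with
      | zero => simp only [List.getD_cons_zero]; constructor <;> intro h' <;> omega
      | succ j =>
        have hj : j < tl.length := by simpa using hi
        simpa [Nat.succ_le_succ_iff] using ih htl j hj

theorem bsearch_eq (ys : List Int) (t : Int) (h : ys.Pairwise (· > ·)) :
    ∀ d lo hi, hi - lo ≤ d → lo ≤ kOf ys t → kOf ys t ≤ hi → hi ≤ ys.length →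
      bsearchB ys t lo hi = kOf ys t := by
  intro d
  induction d with
  | zero =>
    intro lo hi hd h1 h2 _
    rw [bsearchB]
    have : ¬ lo < hi := by omega
    simp only [this, dite_false]
    omega
  | succ d ih =>
    intro lo hi hd h1 h2 hlen
    rw [bsearchB]
    by_cases hlt : lo < hi
    · simp only [hlt, dite_true]
      have hmid1 : lo ≤ (lo + hi) / 2 := by omega
      have hmid2 : (lo + hi) / 2 < hi := by omega
      have hmlen : (lo + hi) / 2 < ys.length := by omega
      by_cases hc : 2 * ys.getD ((lo + hi) / 2) 0 ≤ t
      · have hk : kOf ys t ≤ (lo + hi) / 2 := (desc_char ys t h _ hmlen).mp hc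
        simp only [hc, if_true]
        exact ih lo ((lo + hi) / 2) (by omega) h1 hk (by omega)
      · have hk : ¬ kOf ys t ≤ (lo + hi) / 2 := fun hle => hc ((desc_char ys t h _ hmlen).mpr hle)
        simp only [hc, if_false]
        exact ih ((lo + hi) / 2 + 1) hi (by omega) (by omega) h2 hlen
    · simp only [hlt, dite_false]; omega

theorem innerA_all (mx x : Int) (ys : List Int)
    (hall : ∀ z ∈ ys, 3 * x + 2 * z ≤ mx ∧ x ≠ z) :
    innerA mx x ys = ys.head? := by
  cases ys with
  | nil => simp [innerA]
  | cons z zs => simp [innerA, hall z (by simp)]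

theorem inner_eq (mx x : Int) (ys : List Int) (h : ys.Pairwise (· > ·)) :
    innerA mx x ys = searchAtB ys (kOf ys (mx - 3 * x)) x := by
  induction ys with
  | nil => simp [innerA, searchAtB, kOf]
  | cons y tl ih =>
    rcases List.pairwise_cons.mp h with ⟨hy, htl⟩
    by_cases hcy : 2 * y ≤ mx - 3 * x
    · have hk : kOf (y :: tl) (mx - 3 * x) = 0 := by
        simp [kOf, List.takeWhile, hcy]
      by_cases hxy : x = y
      · subst hxy
        have : ¬ (3 * x + 2 * x ≤ mx ∧ x ≠ x) := by simp
        simp only [innerA, if_neg this]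
        rw [innerA_all mx x tl (fun z hz => by
          have hz' : z < x := hy _ hz
          exact ⟨by omega, by omega⟩)]
        rw [hk]
        cases tl with
        | nil => simp [searchAtB]
        | cons w ws => simp [searchAtB]
      · have hcond : 3 * x + 2 * y ≤ mx ∧ x ≠ y := ⟨by omega, hxy⟩
        rw [hk]
        simp [innerA, hcond, searchAtB, Ne.symm hxy]
    · have hk : kOf (y :: tl) (mx - 3 * x) = kOf tl (mx - 3 * x) + 1 := by
        simp [kOf, List.takeWhile, hcy]
      have hcond : ¬ (3 * x + 2 * y ≤ mx ∧ x ≠ y) := by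
        intro hc; omega
      rw [show innerA mx x (y :: tl) = innerA mx x tl by simp [innerA, hcond]]
      rw [ih htl, hk]
      have hle := kOf_le_length tl (mx - 3 * x)
      simp only [searchAtB, List.length_cons, List.getD_cons_succ,
        Nat.add_lt_add_iff_right]

theorem step_eq (mx x : Int) (front : Option Int) (ys : List Int) (h : ys.Pairwise (· > ·)) :
    innerA mx x (front.toList ++ ys) = stepB mx x front ys := by
  have hsearch : innerA mx x ys = searchAtB ys (bsearchB ys (mx - 3 * x) 0 ys.length) x := by
    rw [bsearch_eq ys (mx - 3 * x) h ys.length 0 ys.length (by omega) (by omega)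
      (kOf_le_length ys _) (le_refl _)]
    exact inner_eq mx x ys h
  cases front with
  | none => simpa [stepB] using hsearch
  | some f =>
    by_cases hc : 3 * x + 2 * f ≤ mx ∧ x ≠ f
    · simp [innerA, stepB, hc]
    · simp only [Option.toList, List.cons_append, List.nil_append]
      rw [show innerA mx x (f :: ys) = innerA mx x ys by simp [innerA, hc]]
      simp [stepB, hc, hsearch]

theorem outer_eq (mx : Int) (front : Option Int) (ys : List Int) (h : ys.Pairwise (· > ·)) :
    ∀ xs, outerA mx (front.toList ++ ys) xs = outerB mx front ys xs := by
  intro xs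
  induction xs with
  | nil => simp [outerA, outerB]
  | cons x rest ih =>
    simp only [outerA, outerB, step_eq mx x front ys h, ih]

-- sorted(l, reverse=True) is the reverse of sorted(l) when l has no duplicates
theorem sorted_rev_eq_reverse (l : List Int) (hnd : l.Nodup) :
    PySem.List.sorted l (fun k => k) true = (PySem.List.sorted l (fun k => k) false).reverse := by
  apply PySem.List.sorted_rev_eq_of_perm_of_pairwise_gt
  · exact (List.reverse_perm _).trans (PySem.List.sorted_perm l (fun k => k) false)
  · rw [List.pairwise_reverse]
    have hle : (PySem.List.sorted l (fun k => k) false).Pairwise (· ≤ ·) :=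
      PySem.List.sorted_pairwise l (fun k => k)
    have hnd' : (PySem.List.sorted l (fun k => k) false).Nodup :=
      (List.Perm.nodup_iff (PySem.List.sorted_perm l (fun k => k) false)).mpr hnd
    exact (hle.and hnd').imp (fun {a b} hab => lt_of_le_of_ne hab.1 hab.2)

theorem keys_filter_nodup (array : List Int) (p : Int × Int → Bool) :
    (((PySem.Dict.counter array).items.filter p).map Prod.fst).Nodup := by
  have hsub : (((PySem.Dict.counter array).items.filter p).map Prod.fst).Sublist
      ((PySem.Dict.counter array).items.map Prod.fst) :=
    List.Sublist.map Prod.fst (List.filter_sublist (p := p) (l := (PySem.Dict.counter array).items))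
  exact (PySem.Dict.nodup_keys_counter array).sublist hsub

-- the strictly descending shape of a reverse-sorted nodup list
theorem desc_sorted (l : List Int) (hnd : l.Nodup) :
    (PySem.List.sorted l (fun k => k) true).Pairwise (· > ·) := by
  rw [sorted_rev_eq_reverse l hnd, List.pairwise_reverse]
  have hle : (PySem.List.sorted l (fun k => k) false).Pairwise (· ≤ ·) :=
    PySem.List.sorted_pairwise l (fun k => k)
  have hnd' : (PySem.List.sorted l (fun k => k) false).Nodup :=
    (List.Perm.nodup_iff (PySem.List.sorted_perm l (fun k => k) false)).mpr hnd
  exact (hle.and hnd').imp (fun {a b} hab => lt_of_le_of_ne hab.1 hab.2)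

-- candidate lists: B's sort-ascending-then-reverse equals A's sorted(reverse=True)
theorem candB_eq (array : List Int) (cmin mul mx : Int) :
    candB (PySem.Dict.counter array) cmin mul mx =
      PySem.List.sorted (((PySem.Dict.counter array).items.filter
        (fun p => decide (cmin ≤ p.2) && decide (mul * p.1 < mx))).map Prod.fst) (fun k => k) true := by
  rw [candB, sorted_rev_eq_reverse _ (keys_filter_nodup array _)]

-- ===== VERDICT (by name: the statement is the Claim_ definition above) =====
theorem solution_spec : Claim_equal_solution := by
  intro n mx array _
  show solution n mx array = solution_alt n mx array
  simp only [solution, solution_alt]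
  rw [show countsB array = PySem.Dict.counter array from
    PySem.Dict.foldl_insert_getD_add_one_eq_counter array]
  rw [candB_eq array 2 2 mx, candB_eq array 3 3 mx]
  set tb := PySem.List.sorted (((PySem.Dict.counter array).items.filter
    (fun p => decide ((2:Int) ≤ p.2) && decide (2 * p.1 < mx))).map Prod.fst) (fun k => k) true with htb
  set ta := PySem.List.sorted (((PySem.Dict.counter array).items.filter
    (fun p => decide ((3:Int) ≤ p.2) && decide (3 * p.1 < mx))).map Prod.fst) (fun k => k) true with hta
  have hdescb : tb.Pairwise (· > ·) := desc_sorted _ (keys_filter_nodup array _)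
  have hxs : reorderA ta = if 1 ∈ ta then 1 :: ta.dropLast else ta := rfl
  rw [hxs]
  by_cases h1b : (1 : Int) ∈ tb
  · rw [if_pos h1b, reorderA, if_pos h1b]
    have hdesc' : tb.dropLast.Pairwise (· > ·) := hdescb.sublist (List.dropLast_sublist tb)
    have h := outer_eq mx (some 1) tb.dropLast hdesc' (if 1 ∈ ta then 1 :: ta.dropLast else ta)
    simpa using h
  · rw [if_neg h1b, reorderA, if_neg h1b]
    have h := outer_eq mx none tb hdescb (if 1 ∈ ta then 1 :: ta.dropLast else ta)
    simpa using h
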